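-- pv_equiv track=rewrite | github.com/mkern75/EverybodyCodes | TheSongOfDucksAndDragons2025/q10.py | get_safe_positions
-- ===== SOURCE A (Python) =====
-- def get_safe_positions(n_rows: int, n_cols, hides):
--     safe = set()
--     for r in range(n_rows - 1, -1, -1):
--         for c in range(n_cols):
--             if (r, c) in hides:
--                 if r == n_rows - 1 or (r + 1, c) in safe:
--                     safe.add((r, c))
--     return safe
-- ===== SOURCE B (Python) =====
-- def get_safe_positions(n_rows: int, n_cols, hides):
--     # Index the hide cells by row (only in-grid cells matter), then walk the
--     # occupied rows bottom-up, propagating safety column-wise.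
--     by_row = {}
--     for (r, c) in hides:
--         if 0 <= r < n_rows and 0 <= c < n_cols:
--             by_row.setdefault(r, set()).add(c)
--     safe = set()
--     for r in sorted(by_row, reverse=True):
--         for c in sorted(by_row[r]):
--             if r == n_rows - 1 or (r + 1, c) in safe:
--                 safe.add((r, c))
--     return safe
-- ===== Notes on version B (the rewrite author's own statement) =====
-- stated objective: faster
-- what changed: Instead of scanning every grid cell and doing a linear membership test in the hides list, B builds a row->columns index of the in-grid hide cells once and walks only the occupied rows bottom-up (sorted descending), propagating safety per column.
import Mathlib
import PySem

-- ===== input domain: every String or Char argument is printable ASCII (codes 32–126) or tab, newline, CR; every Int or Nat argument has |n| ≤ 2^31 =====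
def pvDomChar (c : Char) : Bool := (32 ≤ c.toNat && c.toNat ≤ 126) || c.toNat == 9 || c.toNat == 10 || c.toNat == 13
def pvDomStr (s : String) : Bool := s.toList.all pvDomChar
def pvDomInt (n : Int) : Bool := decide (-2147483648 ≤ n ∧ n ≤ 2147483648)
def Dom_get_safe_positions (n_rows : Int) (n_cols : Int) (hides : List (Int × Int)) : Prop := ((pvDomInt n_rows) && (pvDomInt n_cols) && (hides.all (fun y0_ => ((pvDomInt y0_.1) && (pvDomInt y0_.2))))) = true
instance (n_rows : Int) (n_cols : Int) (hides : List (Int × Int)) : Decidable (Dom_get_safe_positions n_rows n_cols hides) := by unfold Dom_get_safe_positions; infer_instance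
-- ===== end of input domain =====

-- B replaces A's full-grid scan (with a linear membership test in the hides list) by a
-- row->columns index of the in-grid hide cells, walking only occupied rows bottom-up: faster.


-- ===== PORT A =====
def get_safe_positions (n_rows : Int) (n_cols : Int) (hides : List (Int × Int)) : List (Int × Int) :=
  (PySem.List.pyRange (n_rows - 1) (-1) (-1)).foldl (fun safe r =>
    (PySem.List.pyRange 0 n_cols 1).foldl (fun safe c =>
      if (r, c) ∈ hides then
        if r = n_rows - 1 ∨ (r + 1, c) ∈ safe then PySem.Set.add safe (r, c) else safe
      else safe) safe) PySem.Set.empty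

-- ===== PORT B =====
-- the 'for (r, c) in hides: if in-grid: by_row.setdefault(r, set()).add(c)' loop of Source B
def pvBuildRows (n_rows : Int) (n_cols : Int) (hides : List (Int × Int))
    (d : PySem.Dict Int (List Int)) : PySem.Dict Int (List Int) :=
  hides.foldl (fun d p =>
    if 0 ≤ p.1 ∧ p.1 < n_rows ∧ 0 ≤ p.2 ∧ p.2 < n_cols then
      d.insert p.1 (PySem.Set.add (d.getD p.1 PySem.Set.empty) p.2)
    else d) d

def get_safe_positions_alt (n_rows : Int) (n_cols : Int) (hides : List (Int × Int)) : List (Int × Int) :=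
  let by_row := pvBuildRows n_rows n_cols hides PySem.Dict.empty
  (PySem.List.sorted by_row.keys (fun x => x) true).foldl (fun safe r =>
    (PySem.List.sorted (by_row.getD r PySem.Set.empty) (fun x => x) false).foldl (fun safe c =>
      if r = n_rows - 1 ∨ (r + 1, c) ∈ safe then PySem.Set.add safe (r, c) else safe) safe)
    PySem.Set.empty

-- ===== PRECONDITION & SPEC =====
def Spec_get_safe_positions (n_rows : Int) (n_cols : Int) (hides : List (Int × Int)) (out : List (Int × Int)) : Prop := out = get_safe_positions_alt n_rows n_cols hides
instance (n_rows : Int) (n_cols : Int) (hides : List (Int × Int)) (out : List (Int × Int)) : Decidable (Spec_get_safe_positions n_rows n_cols hides out) := by unfold Spec_get_safe_positions; infer_instance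

-- ===== CLAIM (what is proved, stated in full; the proofs are below) =====
def Claim_equal_get_safe_positions : Prop := ∀ (n_rows : Int) (n_cols : Int) (hides : List (Int × Int)), Dom_get_safe_positions n_rows n_cols hides → Spec_get_safe_positions n_rows n_cols hides (get_safe_positions n_rows n_cols hides)

-- ===== LEMMAS AND PROOFS =====

-- the column step both ports perform, and the ascending in-grid hide columns of a row
def pvStep (n_rows : Int) (r : Int) (safe : List (Int × Int)) (c : Int) : List (Int × Int) :=
  if r = n_rows - 1 ∨ (r + 1, c) ∈ safe then PySem.Set.add safe (r, c) else safe

def pvColsOf (n_cols : Int) (hides : List (Int × Int)) (r : Int) : List Int :=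
  (PySem.List.pyRange 0 n_cols 1).filter (fun c => decide ((r, c) ∈ hides))

theorem pv_mem_colsOf (n_cols : Int) (hides : List (Int × Int)) (r c : Int) :
    c ∈ pvColsOf n_cols hides r ↔ (0 ≤ c ∧ c < n_cols) ∧ (r, c) ∈ hides := by
  simp [pvColsOf, List.mem_filter, PySem.List.mem_pyRange_one]

theorem pv_nodup_colsOf (n_cols : Int) (hides : List (Int × Int)) (r : Int) :
    (pvColsOf n_cols hides r).Nodup :=
  (PySem.List.nodup_pyRange_one 0 n_cols).filter _

theorem pv_pairwise_colsOf (n_cols : Int) (hides : List (Int × Int)) (r : Int) :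
    (pvColsOf n_cols hides r).Pairwise (· < ·) :=
  (PySem.List.pairwise_lt_pyRange_one 0 n_cols).filter _

theorem pvFoldl_guard_filter {α β : Type} (p : α → Prop) [DecidablePred p] (f : β → α → β) :
    ∀ (l : List α) (init : β),
      l.foldl (fun s x => if p x then f s x else s) init
        = (l.filter (fun x => decide (p x))).foldl f init := by
  intro l
  induction l with
  | nil => intro init; rfl
  | cons x t ih =>
      intro init
      simp only [List.foldl_cons, List.filter_cons]
      by_cases h : p x
      · simp [h, ih]
      · simp [h, ih]

theorem pvFoldl_drop_id {α β : Type} (p : α → Bool) (g : β → α → β)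
    (h : ∀ x, p x = false → ∀ s, g s x = s) :
    ∀ (l : List α) (init : β), l.foldl g init = (l.filter p).foldl g init := by
  intro l
  induction l with
  | nil => intro init; rfl
  | cons x t ih =>
      intro init
      simp only [List.foldl_cons, List.filter_cons]
      cases hp : p x with
      | false => simp [h x hp, ih]
      | true => simp [ih]

theorem pv_mem_getD_buildRows (n_rows n_cols : Int) :
    ∀ (hides : List (Int × Int)) (d : PySem.Dict Int (List Int)) (r c : Int),
      c ∈ (pvBuildRows n_rows n_cols hides d).getD r PySem.Set.empty
        ↔ c ∈ d.getD r PySem.Set.empty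
            ∨ ((r, c) ∈ hides ∧ (0 ≤ r ∧ r < n_rows ∧ 0 ≤ c ∧ c < n_cols)) := by
  intro hides
  induction hides with
  | nil => intro d r c; simp [pvBuildRows]
  | cons p t ih =>
      intro d r c
      simp only [pvBuildRows, List.foldl_cons]
      by_cases hb : 0 ≤ p.1 ∧ p.1 < n_rows ∧ 0 ≤ p.2 ∧ p.2 < n_cols
      · rw [if_pos hb]
        rw [show (List.foldl _ (d.insert p.1 (PySem.Set.add (d.getD p.1 PySem.Set.empty) p.2)) t) = pvBuildRows n_rows n_cols t (d.insert p.1 (PySem.Set.add (d.getD p.1 PySem.Set.empty) p.2)) from rfl]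
        rw [ih, PySem.Dict.getD_insert]
        by_cases hr : r = p.1
        · subst hr
          rw [if_pos rfl, PySem.Set.mem_add]
          simp only [List.mem_cons, Prod.ext_iff]
          constructor
          · rintro ((h | h) | ⟨h, hB⟩)
            · exact Or.inl h
            · exact Or.inr ⟨Or.inl ⟨trivial, h⟩, h ▸ hb⟩
            · exact Or.inr ⟨Or.inr h, hB⟩
          · rintro (h | ⟨(⟨-, h⟩ | h), hB⟩)
            · exact Or.inl (Or.inl h)
            · exact Or.inl (Or.inr h)
            · exact Or.inr ⟨h, hB⟩
        · rw [if_neg hr]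
          simp only [List.mem_cons, Prod.ext_iff]
          constructor
          · rintro (h | ⟨h, hB⟩)
            · exact Or.inl h
            · exact Or.inr ⟨Or.inr h, hB⟩
          · rintro (h | ⟨(⟨h1, h2⟩ | h), hB⟩)
            · exact Or.inl h
            · exact absurd h1 hr
            · exact Or.inr ⟨h, hB⟩
      · rw [if_neg hb]
        rw [show (List.foldl _ d t) = pvBuildRows n_rows n_cols t d from rfl]
        rw [ih]
        simp only [List.mem_cons, Prod.ext_iff]
        constructor
        · rintro (h | ⟨h, hB⟩)
          · exact Or.inl h
          · exact Or.inr ⟨Or.inr h, hB⟩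
        · rintro (h | ⟨(⟨h1, h2⟩ | h), hB⟩)
          · exact Or.inl h
          · subst h1; subst h2; exact absurd hB hb
          · exact Or.inr ⟨h, hB⟩

theorem pv_nodup_getD_buildRows (n_rows n_cols : Int) :
    ∀ (hides : List (Int × Int)) (d : PySem.Dict Int (List Int)),
      (∀ r, (d.getD r PySem.Set.empty).Nodup) →
      ∀ r, ((pvBuildRows n_rows n_cols hides d).getD r PySem.Set.empty).Nodup := by
  intro hides
  induction hides with
  | nil => intro d h r; exact h r
  | cons p t ih =>
      intro d h r
      simp only [pvBuildRows, List.foldl_cons]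
      by_cases hb : 0 ≤ p.1 ∧ p.1 < n_rows ∧ 0 ≤ p.2 ∧ p.2 < n_cols
      · rw [if_pos hb]
        refine ih _ ?_ r
        intro r'
        rw [PySem.Dict.getD_insert]
        by_cases hr : r' = p.1
        · rw [if_pos hr]; exact PySem.Set.nodup_add _ _ (h p.1)
        · rw [if_neg hr]; exact h r'
      · rw [if_neg hb]; exact ih d h r

theorem pv_mem_keys_buildRows (n_rows n_cols : Int) :
    ∀ (hides : List (Int × Int)) (d : PySem.Dict Int (List Int)) (r : Int),
      r ∈ (pvBuildRows n_rows n_cols hides d).keys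
        ↔ r ∈ d.keys ∨ ∃ c, (r, c) ∈ hides ∧ (0 ≤ r ∧ r < n_rows ∧ 0 ≤ c ∧ c < n_cols) := by
  intro hides
  induction hides with
  | nil => intro d r; simp [pvBuildRows]
  | cons p t ih =>
      intro d r
      simp only [pvBuildRows, List.foldl_cons]
      by_cases hb : 0 ≤ p.1 ∧ p.1 < n_rows ∧ 0 ≤ p.2 ∧ p.2 < n_cols
      · rw [if_pos hb]
        rw [show (List.foldl _ (d.insert p.1 (PySem.Set.add (d.getD p.1 PySem.Set.empty) p.2)) t) = pvBuildRows n_rows n_cols t (d.insert p.1 (PySem.Set.add (d.getD p.1 PySem.Set.empty) p.2)) from rfl]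
        rw [ih, PySem.Dict.mem_keys_insert]
        constructor
        · rintro ((h | h) | ⟨c, hc, hB⟩)
          · subst h; exact Or.inr ⟨p.2, List.mem_cons_self .., hb⟩
          · exact Or.inl h
          · exact Or.inr ⟨c, List.mem_cons_of_mem _ hc, hB⟩
        · rintro (h | ⟨c, hc, hB⟩)
          · exact Or.inl (Or.inr h)
          · rcases List.mem_cons.mp hc with h | h
            · exact Or.inl (Or.inl (by have := congrArg Prod.fst h; simpa using this))
            · exact Or.inr ⟨c, h, hB⟩
      · rw [if_neg hb]
        rw [show (List.foldl _ d t) = pvBuildRows n_rows n_cols t d from rfl]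
        rw [ih]
        constructor
        · rintro (h | ⟨c, hc, hB⟩)
          · exact Or.inl h
          · exact Or.inr ⟨c, List.mem_cons_of_mem _ hc, hB⟩
        · rintro (h | ⟨c, hc, hB⟩)
          · exact Or.inl h
          · rcases List.mem_cons.mp hc with h | h
            · exfalso; apply hb
              have h1 := congrArg Prod.fst h
              have h2 := congrArg Prod.snd h
              simp only at h1 h2
              subst h1; subst h2
              exact hB
            · exact Or.inr ⟨c, h, hB⟩

theorem pv_nodup_keys_buildRows (n_rows n_cols : Int) :
    ∀ (hides : List (Int × Int)) (d : PySem.Dict Int (List Int)),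
      d.keys.Nodup → (pvBuildRows n_rows n_cols hides d).keys.Nodup := by
  intro hides
  induction hides with
  | nil => intro d h; exact h
  | cons p t ih =>
      intro d h
      simp only [pvBuildRows, List.foldl_cons]
      by_cases hb : 0 ≤ p.1 ∧ p.1 < n_rows ∧ 0 ≤ p.2 ∧ p.2 < n_cols
      · rw [if_pos hb]; exact ih _ (PySem.Dict.nodup_keys_insert _ _ _ h)
      · rw [if_neg hb]; exact ih d h

-- sorted(by_row[r]) is exactly the in-grid hide columns of row r, ascending (for in-grid r)
theorem pv_sorted_getD_eq_colsOf (n_rows n_cols : Int) (hides : List (Int × Int)) (r : Int)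
    (hr0 : 0 ≤ r) (hr1 : r < n_rows) :
    PySem.List.sorted ((pvBuildRows n_rows n_cols hides PySem.Dict.empty).getD r PySem.Set.empty)
        (fun x => x) false
      = pvColsOf n_cols hides r := by
  apply PySem.List.sorted_eq_of_perm_of_pairwise_lt
  · rw [List.perm_ext_iff_of_nodup (pv_nodup_colsOf n_cols hides r)
      (pv_nodup_getD_buildRows n_rows n_cols hides PySem.Dict.empty
        (by intro r'; rw [PySem.Dict.getD_empty]; exact List.nodup_nil) r)]
    intro c
    rw [pv_mem_colsOf, pv_mem_getD_buildRows, PySem.Dict.getD_empty]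
    constructor
    · rintro ⟨⟨hc0, hc1⟩, hm⟩
      exact Or.inr ⟨hm, hr0, hr1, hc0, hc1⟩
    · rintro (h | ⟨hm, _, _, hc0, hc1⟩)
      · exact absurd h (List.not_mem_nil)
      · exact ⟨⟨hc0, hc1⟩, hm⟩
  · exact pv_pairwise_colsOf n_cols hides r

-- sorted(by_row, reverse=True) is exactly the occupied in-grid rows, descending
theorem pv_sorted_keys_eq (n_rows n_cols : Int) (hides : List (Int × Int)) :
    PySem.List.sorted (pvBuildRows n_rows n_cols hides PySem.Dict.empty).keys (fun x => x) true
      = (PySem.List.pyRange (n_rows - 1) (-1) (-1)).filter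
          (fun r => !(pvColsOf n_cols hides r).isEmpty) := by
  apply PySem.List.sorted_rev_eq_of_perm_of_pairwise_gt
  · rw [List.perm_ext_iff_of_nodup
      (by
        rw [PySem.List.pyRange_neg_one_eq_reverse]
        exact (List.nodup_reverse.mpr (PySem.List.nodup_pyRange_one _ _)).filter _)
      (pv_nodup_keys_buildRows n_rows n_cols hides PySem.Dict.empty
        (by rw [PySem.Dict.keys_empty]; exact List.nodup_nil))]
    intro r
    rw [pv_mem_keys_buildRows, PySem.Dict.keys_empty, List.mem_filter]
    constructor
    · rintro ⟨hmem, hp⟩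
      rcases PySem.List.mem_pyRange_neg_one.mp hmem with ⟨hlo, hhi⟩
      have hne : pvColsOf n_cols hides r ≠ [] := by
        intro hnil
        rw [hnil] at hp
        simp at hp
      rcases List.exists_mem_of_ne_nil _ hne with ⟨c, hc⟩
      rcases (pv_mem_colsOf n_cols hides r c).mp hc with ⟨⟨hc0, hc1⟩, hm⟩
      exact Or.inr ⟨c, hm, by omega, by omega, hc0, hc1⟩
    · rintro (h | ⟨c, hm, hr0, hr1, hc0, hc1⟩)
      · exact absurd h (List.not_mem_nil)
      · refine ⟨PySem.List.mem_pyRange_neg_one.mpr ⟨by omega, by omega⟩, ?_⟩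
        have hc : c ∈ pvColsOf n_cols hides r :=
          (pv_mem_colsOf n_cols hides r c).mpr ⟨⟨hc0, hc1⟩, hm⟩
        cases hcols : pvColsOf n_cols hides r with
        | nil => rw [hcols] at hc; exact absurd hc (List.not_mem_nil)
        | cons a l => simp
  · rw [PySem.List.pyRange_neg_one_eq_reverse]
    exact (List.pairwise_reverse.mpr
      (by
        have := PySem.List.pairwise_lt_pyRange_one 0 (n_rows - 1 + 1)
        exact this.imp (fun h => h))).filter _

-- ===== VERDICT (by name: the statement is the Claim_ definition above) =====
theorem get_safe_positions_spec : Claim_equal_get_safe_positions := by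
  intro n_rows n_cols hides _
  unfold Spec_get_safe_positions
  show get_safe_positions n_rows n_cols hides = get_safe_positions_alt n_rows n_cols hides
  have hA1 : get_safe_positions n_rows n_cols hides
      = (PySem.List.pyRange (n_rows - 1) (-1) (-1)).foldl
          (fun safe r => (pvColsOf n_cols hides r).foldl (pvStep n_rows r) safe)
          PySem.Set.empty := by
    unfold get_safe_positions
    apply PySem.List.foldl_congr_mem
    intro safe r _
    exact pvFoldl_guard_filter (fun c => (r, c) ∈ hides) (pvStep n_rows r)
      (PySem.List.pyRange 0 n_cols 1) safe
  rw [hA1]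
  rw [pvFoldl_drop_id (fun r => !(pvColsOf n_cols hides r).isEmpty)
      (fun safe r => (pvColsOf n_cols hides r).foldl (pvStep n_rows r) safe)
      (by
        intro r hfalse s
        have : (pvColsOf n_cols hides r) = [] := by
          simpa [List.isEmpty_iff] using hfalse
        simp [this])]
  show _ = (PySem.List.sorted (pvBuildRows n_rows n_cols hides PySem.Dict.empty).keys (fun x => x) true).foldl
      (fun safe r =>
        (PySem.List.sorted ((pvBuildRows n_rows n_cols hides PySem.Dict.empty).getD r PySem.Set.empty) (fun x => x) false).foldl
          (fun safe c => if r = n_rows - 1 ∨ (r + 1, c) ∈ safe then PySem.Set.add safe (r, c) else safe) safe)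
      PySem.Set.empty
  rw [pv_sorted_keys_eq n_rows n_cols hides]
  apply (PySem.List.foldl_congr_mem _ _ _ _ ?_).symm
  intro acc r hrmem
  have hrr : 0 ≤ r ∧ r < n_rows := by
    rcases List.mem_filter.mp hrmem with ⟨hmem, _⟩
    rcases PySem.List.mem_pyRange_neg_one.mp hmem with ⟨h1, h2⟩
    omega
  rw [pv_sorted_getD_eq_colsOf n_rows n_cols hides r hrr.1 hrr.2]
  rfl
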